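-- pv_equiv track=rewrite | github.com/incremen/avl_tree_project | 3rd_experiment/exp_3.py | remove_largest_points
-- ===== SOURCE A (Python) =====
-- def remove_largest_points(xs, ys, num_remove=17):
--     """
--     Remove the num_remove largest points from ys (and corresponding xs).
--     Returns filtered (xs, ys) as new lists.
--     """
--     if len(ys) <= num_remove:
--         return xs, ys
--     # Get indices of the largest points
--     largest_indices = sorted(range(len(ys)), key=lambda i: ys[i], reverse=True)[:num_remove]
--     largest_indices_set = set(largest_indices)
--     filtered_xs = [x for i, x in enumerate(xs) if i not in largest_indices_set]
--     filtered_ys = [y for i, y in enumerate(ys) if i not in largest_indices_set]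
--     return filtered_xs, filtered_ys
-- ===== SOURCE B (Python) =====
-- def remove_largest_points(xs, ys, num_remove=17):
--     """
--     Remove the num_remove largest points from ys (and corresponding xs).
--     Returns filtered (xs, ys) as new lists.
--     """
--     if len(ys) <= num_remove:
--         return xs, ys
--     pairs = sorted(enumerate(ys), key=lambda p: p[1], reverse=True)
--     fx, fy = [], []
--     prev = 0
--     for i in sorted(i for i, _ in pairs[:num_remove]):
--         fx.extend(xs[prev:i])
--         fy.extend(ys[prev:i])
--         prev = i + 1
--     fx.extend(xs[prev:])
--     fy.extend(ys[prev:])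
--     return fx, fy
-- ===== Notes on version B (the rewrite author's own statement) =====
-- stated objective: alternative
-- what changed: B sorts enumerate(ys) by value once, sorts the top-num_remove indices ascending and copies the gap segments between them with slice-extends (one linear reassembly pass), instead of A's building a removed-index set and filtering two fresh enumerations element-by-element against it.
import Mathlib
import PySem

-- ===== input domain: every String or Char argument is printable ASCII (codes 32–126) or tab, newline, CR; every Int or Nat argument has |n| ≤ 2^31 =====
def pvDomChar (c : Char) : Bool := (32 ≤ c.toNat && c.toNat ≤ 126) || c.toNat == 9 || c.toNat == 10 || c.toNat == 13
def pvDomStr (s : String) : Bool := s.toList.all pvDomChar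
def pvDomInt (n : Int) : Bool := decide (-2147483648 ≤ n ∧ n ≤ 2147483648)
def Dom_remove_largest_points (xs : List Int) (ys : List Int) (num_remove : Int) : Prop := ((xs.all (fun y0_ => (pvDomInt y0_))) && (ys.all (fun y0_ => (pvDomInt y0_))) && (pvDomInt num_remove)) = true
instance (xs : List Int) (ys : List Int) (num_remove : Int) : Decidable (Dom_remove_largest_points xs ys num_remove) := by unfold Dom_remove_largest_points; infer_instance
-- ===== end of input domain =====

-- B sorts enumerate(ys) by value once and reassembles the outputs by copying the gap segments
-- between the ascending removed indices, instead of A's removed-index set and two filtered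
-- enumerations (alternative decomposition, same cost); equivalence proved on all inputs.

-- ===== PORT A =====
def remove_largest_points (xs : List Int) (ys : List Int) (num_remove : Int) : List Int × List Int :=
  if (ys.length : Int) ≤ num_remove then (xs, ys)
  else
    -- sorted(range(len(ys)), key=lambda i: ys[i], reverse=True)[:num_remove];
    -- ys[i] via pyGetD is exact here since every i is in range(len(ys))
    let largest_indices := PySem.List.slice
      (PySem.List.sorted (PySem.List.pyRange 0 (ys.length : Int) 1) (fun i => PySem.List.pyGetD ys i 0) true)
      none (some num_remove)
    let largest_indices_set := PySem.Set.ofList largest_indices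
    let filtered_xs := ((PySem.List.enumerate xs 0).filter
      (fun p => !(PySem.Set.contains largest_indices_set p.1))).map (fun p => p.2)
    let filtered_ys := ((PySem.List.enumerate ys 0).filter
      (fun p => !(PySem.Set.contains largest_indices_set p.1))).map (fun p => p.2)
    (filtered_xs, filtered_ys)

-- ===== PORT B =====
def remove_largest_points_alt (xs : List Int) (ys : List Int) (num_remove : Int) : List Int × List Int :=
  if (ys.length : Int) ≤ num_remove then (xs, ys)
  else
    let pairs := PySem.List.sorted (PySem.List.enumerate ys 0) (fun p => p.2) true
    let removed := PySem.List.sorted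
      ((PySem.List.slice pairs none (some num_remove)).map (fun p => p.1)) (fun i => i) false
    let st := removed.foldl (fun (st : List Int × List Int × Int) i =>
      (st.1 ++ PySem.List.slice xs (some st.2.2) (some i),
       st.2.1 ++ PySem.List.slice ys (some st.2.2) (some i),
       i + 1)) ([], [], 0)
    (st.1 ++ PySem.List.slice xs (some st.2.2) none,
     st.2.1 ++ PySem.List.slice ys (some st.2.2) none)

-- ===== PRECONDITION & SPEC =====
def Spec_remove_largest_points (xs : List Int) (ys : List Int) (num_remove : Int) (out : List Int × List Int) : Prop := out = remove_largest_points_alt xs ys num_remove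
instance (xs : List Int) (ys : List Int) (num_remove : Int) (out : List Int × List Int) : Decidable (Spec_remove_largest_points xs ys num_remove out) := by unfold Spec_remove_largest_points; infer_instance

-- ===== CLAIM (what is proved, stated in full; the proofs are below) =====
def Claim_equal_remove_largest_points : Prop := ∀ (xs : List Int) (ys : List Int) (num_remove : Int), Dom_remove_largest_points xs ys num_remove → Spec_remove_largest_points xs ys num_remove (remove_largest_points xs ys num_remove)

-- ===== LEMMAS AND PROOFS =====

-- "keep the elements whose index satisfies P", stated via zipIdx with an arbitrary start index
def pvKeep {α : Type} (l : List α) (P : Nat → Bool) (s : Nat) : List α :=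
  ((l.zipIdx s).filter (fun p => P p.2)).map (fun p => p.1)

theorem pvKeep_cons {α : Type} (x : α) (t : List α) (P : Nat → Bool) (s : Nat) :
    pvKeep (x :: t) P s = (if P s then [x] else []) ++ pvKeep t P (s + 1) := by
  simp [pvKeep, List.zipIdx_cons, List.filter_cons]
  split <;> simp

theorem pvKeep_append {α : Type} (a b : List α) (P : Nat → Bool) (s : Nat) :
    pvKeep (a ++ b) P s = pvKeep a P s ++ pvKeep b P (s + a.length) := by
  simp [pvKeep, List.zipIdx_append, List.filter_append]

theorem pvKeep_all_true {α : Type} (l : List α) (P : Nat → Bool) (s : Nat)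
    (h : ∀ j, s ≤ j → j < s + l.length → P j = true) : pvKeep l P s = l := by
  unfold pvKeep
  rw [List.filter_eq_self.mpr, List.zipIdx_map_fst]
  intro p hp
  have hm := List.mem_zipIdx hp
  exact h p.2 hm.1 hm.2.1

theorem pvKeep_congr {α : Type} (l : List α) (P Q : Nat → Bool) (s : Nat)
    (h : ∀ j, s ≤ j → j < s + l.length → P j = Q j) : pvKeep l P s = pvKeep l Q s := by
  unfold pvKeep
  rw [List.filter_congr]
  intro p hp
  have hm := List.mem_zipIdx hp
  rw [h p.2 hm.1 hm.2.1]

-- the gap-collecting fold of B, single-list version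
def pvGapFold {α : Type} (l : List α) (R : List Int) (acc : List α) (prev : Int) : List α × Int :=
  R.foldl (fun st i => (st.1 ++ PySem.List.slice l (some st.2) (some i), i + 1)) (acc, prev)

theorem pvGapFold_nil {α : Type} (l : List α) (acc : List α) (prev : Int) :
    pvGapFold l [] acc prev = (acc, prev) := rfl

theorem pvGapFold_cons {α : Type} (l : List α) (i : Int) (R : List Int) (acc : List α) (prev : Int) :
    pvGapFold l (i :: R) acc prev
      = pvGapFold l R (acc ++ PySem.List.slice l (some prev) (some i)) (i + 1) := rfl

-- the final index of a gap fold does not depend on the list being sliced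
theorem pvGapFold_snd {α : Type} (l : List α) (R : List Int) (acc : List α) (prev : Int) :
    (pvGapFold l R acc prev).2 = R.foldl (fun _ i => i + 1) prev := by
  induction R generalizing acc prev with
  | nil => rfl
  | cons i t ih => rw [pvGapFold_cons, List.foldl_cons]; exact ih _ _

-- B's triple fold splits into two single-list gap folds sharing the index list
theorem pv_fold_triple {α β : Type} (xs : List α) (ys : List β) (R : List Int)
    (ax : List α) (ay : List β) (prev : Int) :
    R.foldl (fun (st : List α × List β × Int) i =>
        (st.1 ++ PySem.List.slice xs (some st.2.2) (some i),
         st.2.1 ++ PySem.List.slice ys (some st.2.2) (some i), i + 1)) (ax, ay, prev)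
      = ((pvGapFold xs R ax prev).1, (pvGapFold ys R ay prev).1, (pvGapFold xs R ax prev).2) := by
  induction R generalizing ax ay prev with
  | nil => rfl
  | cons i t ih =>
    simp only [List.foldl_cons, pvGapFold_cons]
    exact ih _ _ _

-- collecting the gaps between a strictly ascending list of indices ≥ prev (then the tail)
-- = keeping the complementary indices from position prev on
theorem pv_gap_one {α : Type} (l : List α) (R : List Int) (prev : Nat)
    (hasc : R.Pairwise (fun a b => a < b)) (hge : ∀ i ∈ R, (prev : Int) ≤ i) (acc : List α) :
    (pvGapFold l R acc (prev : Int)).1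
        ++ PySem.List.slice l (some (pvGapFold l R acc (prev : Int)).2) none
      = acc ++ pvKeep (l.drop prev) (fun j => !(decide ((j : Int) ∈ R))) prev := by
  induction R generalizing prev acc with
  | nil =>
    rw [pvGapFold_nil]
    simp only [PySem.List.slice_from_natCast]
    rw [pvKeep_all_true]
    intro j _ _
    simp
  | cons i R' ih =>
    have hip : (prev : Int) ≤ i := hge i (by simp)
    have hi0 : 0 ≤ i := le_trans (by positivity) hip
    set iN := i.toNat with hiN
    have hieq : i = (iN : Int) := by omega
    have hprevle : prev ≤ iN := by omega
    have hR' : ∀ j ∈ R', i < j := by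
      intro j hj; exact (List.pairwise_cons.mp hasc).1 j hj
    rw [pvGapFold_cons]
    have hstep : (i + 1) = ((iN + 1 : Nat) : Int) := by omega
    rw [hstep, ih (iN + 1) (List.pairwise_cons.mp hasc).2
      (by intro j hj; have := hR' j hj; omega)]
    rw [List.append_assoc]
    congr 1
    -- slice l prev i followed by the R'-keep of drop (iN+1) = the (i::R')-keep of drop prev
    rw [hieq, PySem.List.slice_natCast]
    -- split drop prev at iN - prev
    conv_rhs => rw [← List.take_append_drop (iN - prev) (l.drop prev)]
    rw [pvKeep_append, List.drop_drop]
    have hdd : prev + (iN - prev) = iN := by omega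
    rw [hdd]
    have hlenTake : (List.take (iN - prev) (l.drop prev)).length
        = min (iN - prev) (l.length - prev) := by simp
    have hpre : pvKeep (List.take (iN - prev) (l.drop prev))
        (fun j => !(decide ((j : Int) ∈ (iN : Int) :: R'))) prev
        = List.take (iN - prev) (l.drop prev) := by
      apply pvKeep_all_true
      intro j hj1 hj2
      rw [hlenTake] at hj2
      have hjlt : j < iN := by omega
      have h1 : (j : Int) ≠ (iN : Int) := by omega
      have h2 : (j : Int) ∉ R' := by
        intro hm; have := hR' _ hm; omega
      simp [h1, h2]
    rw [hpre]
    congr 1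
    rw [hlenTake]
    by_cases hiL : iN < l.length
    · have hstart : prev + min (iN - prev) (l.length - prev) = iN := by omega
      rw [hstart, List.drop_eq_getElem_cons hiL, pvKeep_cons]
      have hPi : (!(decide ((iN : Int) ∈ (iN : Int) :: R'))) = false := by simp
      rw [hPi]
      simp only [Bool.false_eq_true, if_false, List.nil_append]
      apply Eq.symm
      apply pvKeep_congr
      intro j hj1 _
      have h1 : (j : Int) ≠ (iN : Int) := by omega
      simp [h1]
    · have hnil1 : List.drop iN l = [] := List.drop_eq_nil_of_le (by omega)
      have hnil2 : List.drop (iN + 1) l = [] := List.drop_eq_nil_of_le (by omega)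
      rw [hnil1, hnil2]
      rfl

-- insertBy commutes with map (the comparator pulled back along f)
theorem pv_insertBy_map {α β : Type} (f : α → β) (bf : β → β → Bool) (x : α) (l : List α) :
    PySem.List.insertBy bf (f x) (l.map f) = (PySem.List.insertBy (fun a b => bf (f a) (f b)) x l).map f := by
  induction l with
  | nil => simp [PySem.List.insertBy]
  | cons y t ih =>
    simp only [List.map_cons, PySem.List.insertBy]
    by_cases h : bf (f x) (f y) = true
    · simp [h]
    · simp [h, ih]

theorem pv_foldl_insertBy_map {α β : Type} (f : α → β) (bf : β → β → Bool) (l : List α) (acc : List α) :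
    List.foldl (fun acc x => PySem.List.insertBy bf x acc) (acc.map f) (l.map f)
      = (List.foldl (fun acc x => PySem.List.insertBy (fun a b => bf (f a) (f b)) x acc) acc l).map f := by
  induction l generalizing acc with
  | nil => simp
  | cons y t ih =>
    simp only [List.map_cons, List.foldl_cons]
    rw [pv_insertBy_map, ih]

-- sorting a mapped list by key = mapping the list sorted by the pulled-back key
theorem pv_sorted_map {α β κ : Type} [LT κ] [DecidableLT κ] (f : α → β) (key : β → κ) (rev : Bool) (l : List α) :
    PySem.List.sorted (l.map f) key rev = (PySem.List.sorted l (fun x => key (f x)) rev).map f := by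
  cases rev
  · rw [PySem.List.sorted_eq_foldl_insertBy, PySem.List.sorted_eq_foldl_insertBy]
    exact pv_foldl_insertBy_map f (fun a b => decide (key a < key b)) l []
  · rw [PySem.List.sorted_rev_eq_foldl_insertBy, PySem.List.sorted_rev_eq_foldl_insertBy]
    exact pv_foldl_insertBy_map f (fun a b => decide (key b < key a)) l []

theorem pv_slice_map {α β : Type} (f : α → β) (a? b? : Option Int) (l : List α) :
    PySem.List.slice (l.map f) a? b? = (PySem.List.slice l a? b?).map f := by
  cases a? <;> cases b? <;> simp [PySem.List.slice, List.map_take, List.map_drop]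

-- l[:k] ++ l[k:] = l, for EVERY Int k (Python's slice-partition law)
theorem pv_slice_partition {α : Type} (l : List α) (k : Int) :
    PySem.List.slice l none (some k) ++ PySem.List.slice l (some k) none = l := by
  simp only [PySem.List.slice, Nat.sub_zero, List.drop_zero]
  have h2 : List.take (l.length - PySem.List.clampIdx l.length k)
      (List.drop (PySem.List.clampIdx l.length k) l)
      = List.drop (PySem.List.clampIdx l.length k) l :=
    List.take_of_length_le (by simp)
  rw [h2]
  exact List.take_append_drop _ l

theorem pv_pyRange_nodup (n : Nat) :
    (PySem.List.pyRange 0 (n : Int) 1).Nodup := by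
  rw [PySem.List.pyRange_zero_natCast]
  exact ((List.pairwise_lt_range).map (fun k : Nat => (k : Int))
    (by intro a b h; simpa using h)).imp (fun h => ne_of_lt h)

theorem pv_main (xs ys : List Int) (k : Int) :
    remove_largest_points xs ys k = remove_largest_points_alt xs ys k := by
  unfold remove_largest_points remove_largest_points_alt
  by_cases hle : (ys.length : Int) ≤ k
  · rw [if_pos hle, if_pos hle]
  · rw [if_neg hle, if_neg hle]
    dsimp only
    set f : Int → Int × Int := fun i => (i, PySem.List.pyGetD ys i 0) with hf
    set SI := PySem.List.sorted (PySem.List.pyRange 0 (ys.length : Int) 1) (fun i => PySem.List.pyGetD ys i 0) true with hSI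
    set S0 := PySem.List.slice SI none (some k) with hS0
    have hen : PySem.List.enumerate ys 0 = (PySem.List.pyRange 0 (ys.length : Int) 1).map f := by
      simpa using PySem.List.enumerate_eq_map_pyRange ys 0
    have hpairs : PySem.List.sorted (PySem.List.enumerate ys 0) (fun p => p.2) true = SI.map f := by
      rw [hen, pv_sorted_map]
    -- B's removed index list is S0 sorted ascending
    have hremoved : PySem.List.sorted
        ((PySem.List.slice (PySem.List.sorted (PySem.List.enumerate ys 0) (fun p => p.2) true) none (some k)).map (fun p => p.1))
        (fun i => i) false
        = PySem.List.sorted S0 (fun i : Int => i) false := by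
      rw [hpairs, pv_slice_map, ← hS0, List.map_map]
      have hcomp : ((fun p : Int × Int => p.1) ∘ f) = fun i : Int => i := rfl
      rw [hcomp]
      simp
    set Rasc := PySem.List.sorted S0 (fun i : Int => i) false with hRasc
    -- facts about the removed indices
    have hmemSI : ∀ i ∈ SI, 0 ≤ i ∧ i < (ys.length : Int) := by
      intro i hi
      have := (PySem.List.sorted_perm _ _ _).mem_iff.mp hi
      exact PySem.List.mem_pyRange_one.mp this
    have hpermR : Rasc.Perm S0 := PySem.List.sorted_perm _ _ _
    have hmemR : ∀ i ∈ Rasc, 0 ≤ i ∧ i < (ys.length : Int) := by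
      intro i hi
      exact hmemSI i (PySem.List.mem_of_mem_slice _ _ _ (hpermR.mem_iff.mp hi))
    have hnodupSI : SI.Nodup :=
      (PySem.List.sorted_perm _ _ _).nodup_iff.mpr (pv_pyRange_nodup ys.length)
    have hnodupS0 : S0.Nodup := by
      have := hnodupSI
      rw [← pv_slice_partition SI k, List.nodup_append] at this
      exact this.1
    have hasc : Rasc.Pairwise (fun a b : Int => a < b) := by
      have h1 : Rasc.Pairwise (fun a b : Int => a ≤ b) := PySem.List.sorted_pairwise S0 _
      have h2 : Rasc.Pairwise (fun a b : Int => a ≠ b) := hpermR.nodup_iff.mpr hnodupS0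
      exact (h1.and h2).imp (by intro a b hab; rcases hab with ⟨hle', hne⟩; omega)
    have hge0 : ∀ i ∈ Rasc, ((0 : Nat) : Int) ≤ i := by
      intro i hi
      simpa using (hmemR i hi).1
    -- B side: split the triple fold and reduce each gap fold to a pvKeep
    rw [hremoved, pv_fold_triple xs ys Rasc ([] : List Int) ([] : List Int) 0]
    have hsnd : (pvGapFold xs Rasc [] 0).2 = (pvGapFold ys Rasc [] 0).2 := by
      rw [pvGapFold_snd, pvGapFold_snd]
    rw [hsnd]
    have hz : ((0 : Nat) : Int) = (0 : Int) := rfl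
    have hgap_xs := pv_gap_one xs Rasc 0 hasc hge0 []
    have hgap_ys := pv_gap_one ys Rasc 0 hasc hge0 []
    rw [hz] at hgap_xs hgap_ys
    simp only [List.nil_append, List.drop_zero] at hgap_xs hgap_ys
    rw [hsnd] at hgap_xs
    rw [hgap_xs, hgap_ys]
    -- A side: each filtered comprehension is a pvKeep over the same index predicate
    have hP : (fun j : Nat => !(PySem.Set.contains (PySem.Set.ofList S0) (0 + (j : Int))))
        = (fun j : Nat => !(decide ((j : Int) ∈ Rasc))) := by
      funext j
      by_cases hj : (j : Int) ∈ S0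
      · simp [hj, hpermR.mem_iff.mpr hj]
      · have : (j : Int) ∉ Rasc := fun hm => hj (hpermR.mem_iff.mp hm)
        simp [hj, this]
    have hAside : ∀ l : List Int,
        ((PySem.List.enumerate l 0).filter
          (fun p => !(PySem.Set.contains (PySem.Set.ofList S0) p.1))).map (fun p => p.2)
        = pvKeep l (fun j => !(decide ((j : Int) ∈ Rasc))) 0 := by
      intro l
      rw [PySem.List.enumerate_eq_zipIdx_map l 0, List.filter_map, List.map_map, ← hP]
      rfl
    rw [hAside xs, hAside ys]

-- ===== VERDICT (by name: the statement is the Claim_ definition above) =====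
theorem remove_largest_points_spec : Claim_equal_remove_largest_points := by
  intro xs ys num_remove _
  exact pv_main xs ys num_remove
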